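-- pv_equiv track=rewrite | github.com/mzookim05/t1-3 | scripts/aihub/problem_generation/production_batches/run_descriptive_production_wave.py | move_source_quota
-- ===== SOURCE A (Python) =====
-- def move_source_quota(counts: dict[str, int], source_subset: str, destination_sources: list[str]) -> dict[str, int]:
--     # post-154712에서는 특정 depleted source를 계속 요구하면 preflight가 막히므로,
--     # 같은 doc_type 안의 살아 있는 source로 quota만 옮겨 leakage guard와 문서유형 총량을 함께 지킨다.
--     moved_count = counts.get(source_subset, 0)
--     counts[source_subset] = 0
--     if not destination_sources:
--         return counts
--     for index in range(moved_count):
--         counts[destination_sources[index % len(destination_sources)]] = counts.get(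
--             destination_sources[index % len(destination_sources)],
--             0,
--         ) + 1
--     return counts
-- ===== SOURCE B (Python) =====
-- def move_source_quota(counts: dict[str, int], source_subset: str, destination_sources: list[str]) -> dict[str, int]:
--     # Closed-form round-robin share: one pass over destinations, each gets moved//n plus 1 for the first moved%n.
--     moved = counts.get(source_subset, 0)
--     counts[source_subset] = 0
--     n = len(destination_sources)
--     if n == 0 or moved <= 0:
--         return counts
--     q, r = divmod(moved, n)
--     for j, dest in enumerate(destination_sources):
--         add = q + (1 if j < r else 0)
--         if add:
--             counts[dest] = counts.get(dest, 0) + add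
--     return counts
-- ===== Notes on version B (the rewrite author's own statement) =====
-- stated objective: alternative
-- what changed: Replaces the per-unit round-robin loop over range(moved_count) with a single pass over destination_sources giving each its closed-form share moved//n plus 1 for the first moved%n; cost moves from O(moved_count) iterations to O(len(destination_sources)).
import Mathlib
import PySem

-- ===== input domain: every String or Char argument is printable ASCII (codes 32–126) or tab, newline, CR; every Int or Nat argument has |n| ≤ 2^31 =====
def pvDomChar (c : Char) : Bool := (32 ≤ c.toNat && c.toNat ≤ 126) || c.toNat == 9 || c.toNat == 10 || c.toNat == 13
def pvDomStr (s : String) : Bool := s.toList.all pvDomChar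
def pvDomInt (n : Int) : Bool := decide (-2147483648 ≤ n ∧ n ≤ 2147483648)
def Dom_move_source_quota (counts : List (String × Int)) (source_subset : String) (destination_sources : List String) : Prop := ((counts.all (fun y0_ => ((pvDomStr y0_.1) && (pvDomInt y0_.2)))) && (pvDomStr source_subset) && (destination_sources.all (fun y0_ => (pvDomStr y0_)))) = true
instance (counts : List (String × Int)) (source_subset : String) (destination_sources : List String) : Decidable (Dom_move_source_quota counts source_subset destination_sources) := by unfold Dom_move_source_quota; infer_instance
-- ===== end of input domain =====

-- B: instead of A's per-unit round-robin loop over range(moved_count), a single pass over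
-- destination_sources giving each its closed-form share moved//n (+1 for the first moved%n).
-- Both A and B mutate the Python dict in place and return it; the equivalence proved here is
-- about the returned dict (its items in insertion order), which IS the mutated dict in both.

-- ===== PORT A =====
def move_source_quota (counts : List (String × Int)) (source_subset : String) (destination_sources : List String) : List (String × Int) :=
  let d0 := PySem.Dict.ofList counts
  let moved := d0.getD source_subset 0
  let d1 := d0.insert source_subset 0
  if destination_sources = [] then d1.items
  else
    ((PySem.List.pyRange 0 moved 1).foldl (fun d i =>
        d.insert (PySem.List.pyGetD destination_sources (PySem.Int.mod i (PySem.List.len destination_sources)) "")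
          (d.getD (PySem.List.pyGetD destination_sources (PySem.Int.mod i (PySem.List.len destination_sources)) "") 0 + 1)) d1).items

-- ===== PORT B =====
def move_source_quota_alt (counts : List (String × Int)) (source_subset : String) (destination_sources : List String) : List (String × Int) :=
  let d0 := PySem.Dict.ofList counts
  let moved := d0.getD source_subset 0
  let d1 := d0.insert source_subset 0
  let n := PySem.List.len destination_sources
  if n = 0 ∨ moved ≤ 0 then d1.items
  else
    let q := PySem.Int.floordiv moved n
    let r := PySem.Int.mod moved n
    ((PySem.List.enumerate destination_sources 0).foldl (fun d p =>
        let add := q + (if p.1 < r then 1 else 0)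
        if add ≠ 0 then d.insert p.2 (d.getD p.2 0 + add) else d) d1).items

-- ===== PRECONDITION & SPEC =====
def Spec_move_source_quota (counts : List (String × Int)) (source_subset : String) (destination_sources : List String) (out : List (String × Int)) : Prop := out = move_source_quota_alt counts source_subset destination_sources
instance (counts : List (String × Int)) (source_subset : String) (destination_sources : List String) (out : List (String × Int)) : Decidable (Spec_move_source_quota counts source_subset destination_sources out) := by unfold Spec_move_source_quota; infer_instance

-- ===== CLAIM (what is proved, stated in full; the proofs are below) =====
def Claim_equal_move_source_quota : Prop := ∀ (counts : List (String × Int)) (source_subset : String) (destination_sources : List String), Dom_move_source_quota counts source_subset destination_sources → Spec_move_source_quota counts source_subset destination_sources (move_source_quota counts source_subset destination_sources)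

-- ===== LEMMAS AND PROOFS =====

-- 'pvStep d k a' is one "counts[k] = counts.get(k, 0) + a" update; 'pvRun' / 'pvRunS' replay a
-- job list of such updates (pvRunS skips zero adds, as B does).
def pvStep (d : PySem.Dict String Int) (k : String) (a : Int) : PySem.Dict String Int :=
  d.insert k (d.getD k 0 + a)

def pvRun (l : List (String × Int)) (d : PySem.Dict String Int) : PySem.Dict String Int :=
  l.foldl (fun d p => pvStep d p.1 p.2) d

def pvRunS (l : List (String × Int)) (d : PySem.Dict String Int) : PySem.Dict String Int :=
  l.foldl (fun d p => if p.2 ≠ 0 then pvStep d p.1 p.2 else d) d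

theorem pvRun_cons (p : String × Int) (l : List (String × Int)) (d : PySem.Dict String Int) :
    pvRun (p :: l) d = pvRun l (pvStep d p.1 p.2) := rfl

theorem pvRunS_cons (p : String × Int) (l : List (String × Int)) (d : PySem.Dict String Int) :
    pvRunS (p :: l) d = pvRunS l (if p.2 ≠ 0 then pvStep d p.1 p.2 else d) := rfl

theorem pvRun_append (l1 l2 : List (String × Int)) (d : PySem.Dict String Int) :
    pvRun (l1 ++ l2) d = pvRun l2 (pvRun l1 d) := List.foldl_append

theorem pvRunS_append (l1 l2 : List (String × Int)) (d : PySem.Dict String Int) :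
    pvRunS (l1 ++ l2) d = pvRunS l2 (pvRunS l1 d) := List.foldl_append

theorem pvRunS_eq_run (l : List (String × Int)) (d : PySem.Dict String Int)
    (h : ∀ p ∈ l, p.2 ≠ 0) : pvRunS l d = pvRun l d := by
  induction l generalizing d with
  | nil => rfl
  | cons p l ih =>
    rw [pvRunS_cons, pvRun_cons, if_pos (h p (by simp))]
    exact ih _ (fun q hq => h q (by simp [hq]))

theorem pvRunS_zeros (l : List (String × Int)) (d : PySem.Dict String Int)
    (h : ∀ p ∈ l, p.2 = 0) : pvRunS l d = d := by
  induction l generalizing d with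
  | nil => rfl
  | cons p l ih =>
    rw [pvRunS_cons, if_neg (by simpa using h p (by simp))]
    exact ih _ (fun q hq => h q (by simp [hq]))

theorem pvStep_step_self (d : PySem.Dict String Int) (k : String) (a b : Int) :
    pvStep (pvStep d k a) k b = pvStep d k (a + b) := by
  simp [pvStep, PySem.Dict.getD_insert_self, PySem.Dict.insert_insert_self, add_assoc]

-- two inserts at distinct keys commute when the key inserted second is already present
theorem pvInsert_comm (d : PySem.Dict String Int) (k k' : String) (x y : Int)
    (hne : k ≠ k') (hk : d.contains k = true) :
    (d.insert k' x).insert k y = (d.insert k y).insert k' x := by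
  apply PySem.Dict.ext
  have h1 : (d.insert k' x).contains k = true := by
    rw [PySem.Dict.contains_insert]; simp [hk]
  by_cases hk' : d.contains k' = true
  · have h2 : (d.insert k y).contains k' = true := by
      rw [PySem.Dict.contains_insert]; simp [hk']
    rw [PySem.Dict.items_insert_of_contains _ _ h1, PySem.Dict.items_insert_of_contains _ _ hk',
        PySem.Dict.items_insert_of_contains _ _ h2, PySem.Dict.items_insert_of_contains _ _ hk]
    simp only [List.map_map]
    apply List.map_congr_left
    intro p _
    by_cases e1 : p.1 = k' <;> by_cases e2 : p.1 = k <;>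
      simp [Function.comp, e1, e2, hne, Ne.symm hne]
  · have hk'f : d.contains k' = false := by simpa using hk'
    have h2 : (d.insert k y).contains k' = false := by
      rw [PySem.Dict.contains_insert]; simp [hk'f, Ne.symm hne]
    rw [PySem.Dict.items_insert_of_contains _ _ h1,
        PySem.Dict.items_insert_of_not_contains _ _ hk'f,
        PySem.Dict.items_insert_of_not_contains _ _ h2,
        PySem.Dict.items_insert_of_contains _ _ hk]
    simp [Ne.symm hne]

theorem pvStep_comm (d : PySem.Dict String Int) (k k' : String) (a b : Int)
    (hk : k ∈ d.keys) :
    pvStep (pvStep d k' a) k b = pvStep (pvStep d k b) k' a := by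
  by_cases hkk : k = k'
  · subst hkk; rw [pvStep_step_self, pvStep_step_self, add_comm]
  · have hc : d.contains k = true := (PySem.Dict.contains_iff_mem_keys d k).2 hk
    unfold pvStep
    rw [PySem.Dict.getD_insert_of_ne d _ _ hkk,
        PySem.Dict.getD_insert_of_ne d _ _ (Ne.symm hkk)]
    exact pvInsert_comm d k k' _ _ hkk hc

theorem pvStep_mem_keys (d : PySem.Dict String Int) (k k' : String) (a : Int)
    (hk : k ∈ d.keys) : k ∈ (pvStep d k' a).keys := by
  rw [pvStep, PySem.Dict.mem_keys_insert]; tauto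

theorem pvSwap (l : List (String × Int)) (d : PySem.Dict String Int) (k : String) (b : Int)
    (hk : k ∈ d.keys) : pvStep (pvRun l d) k b = pvRun l (pvStep d k b) := by
  induction l generalizing d with
  | nil => rfl
  | cons p l ih =>
    rw [pvRun_cons, pvRun_cons, ih _ (pvStep_mem_keys d k p.1 p.2 hk),
        pvStep_comm _ _ _ _ _ hk]

-- replaying adds b after adds a (a first) is replaying adds a+b, over the same key sequence
theorem pvComp (l : List (String × Int × Int)) (d : PySem.Dict String Int) :
    pvRunS (l.map fun x => (x.1, x.2.2)) (pvRun (l.map fun x => (x.1, x.2.1)) d)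
      = pvRun (l.map fun x => (x.1, x.2.1 + x.2.2)) d := by
  induction l generalizing d with
  | nil => rfl
  | cons x l ih =>
    obtain ⟨k, a, b⟩ := x
    simp only [List.map_cons, pvRun_cons, pvRunS_cons]
    have hmem : k ∈ (pvStep d k a).keys := by
      rw [pvStep, PySem.Dict.mem_keys_insert]; tauto
    have key : (if b ≠ 0 then
          pvStep (pvRun (l.map fun x => (x.1, x.2.1)) (pvStep d k a)) k b
        else pvRun (l.map fun x => (x.1, x.2.1)) (pvStep d k a))
        = pvRun (l.map fun x => (x.1, x.2.1)) (pvStep d k (a + b)) := by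
      by_cases hb : b = 0
      · subst hb; simp
      · rw [if_pos hb, pvSwap _ _ _ _ hmem, pvStep_step_self]
    rw [key]
    exact ih _

theorem pvBase (N M : Nat) (key : Nat → String) (d : PySem.Dict String Int) (h : M ≤ N) :
    pvRunS ((List.range N).map fun j => (key j, if j < M then (1:Int) else 0)) d
      = pvRun ((List.range M).map fun i => (key i, (1:Int))) d := by
  have hN : N = M + (N - M) := by omega
  rw [hN, List.range_add, List.map_append, pvRunS_append]
  have h1 : ((List.range M).map fun j => (key j, if j < M then (1:Int) else 0))
      = (List.range M).map fun i => (key i, (1:Int)) := by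
    apply List.map_congr_left
    intro i hi
    rw [if_pos (List.mem_range.1 hi)]
  rw [pvRunS_zeros (((List.range (N - M)).map (fun x => M + x)).map
        fun j => (key j, if j < M then (1:Int) else 0)) _ (by
      intro p hp
      simp only [List.map_map, List.mem_map, Function.comp] at hp
      obtain ⟨j, _, rfl⟩ := hp
      simp)]
  rw [h1, pvRunS_eq_run _ _ (by intro p hp; simp at hp; obtain ⟨j, _, rfl⟩ := hp; simp)]

theorem pvMain (M N : Nat) (key : Nat → String) (d : PySem.Dict String Int) (hN : 0 < N) :
    pvRun ((List.range M).map fun i => (key (i % N), (1:Int))) d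
      = pvRunS ((List.range N).map fun j =>
          (key j, ((M / N : Nat) : Int) + if j < M % N then 1 else 0)) d := by
  induction M using Nat.strong_induction_on generalizing d with
  | _ M ih =>
  by_cases hMN : M < N
  · rw [Nat.div_eq_of_lt hMN, Nat.mod_eq_of_lt hMN]
    simp only [Nat.cast_zero, zero_add]
    rw [List.map_congr_left
        (fun i hi => by rw [Nat.mod_eq_of_lt (lt_trans (List.mem_range.1 hi) hMN)])]
    exact (pvBase N M key d (le_of_lt hMN)).symm
  · rw [not_lt] at hMN
    have hM : M = N + (M - N) := by omega
    set x := M - N with hx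
    rw [hM, List.range_add, List.map_append, pvRun_append]
    rw [show ((List.range N).map fun i => (key (i % N), (1:Int)))
          = (List.range N).map (fun i => (key i, (1:Int))) from
        List.map_congr_left (fun i hi => by rw [Nat.mod_eq_of_lt (List.mem_range.1 hi)])]
    rw [List.map_map,
        show ((fun i => (key (i % N), (1:Int))) ∘ fun x => N + x)
          = fun i => (key (i % N), (1:Int)) from
        funext (fun i => by simp [Function.comp, Nat.add_mod_left])]
    rw [ih x (by omega) _]
    have hcomp := pvComp ((List.range N).map fun j =>
      (key j, (1:Int), ((x / N : Nat) : Int) + if j < x % N then 1 else 0)) d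
    simp only [List.map_map, Function.comp_def] at hcomp
    rw [hcomp]
    have hdiv : (N + x) / N = x / N + 1 := by
      rw [Nat.add_comm]; exact Nat.add_div_right x hN
    have hmod : (N + x) % N = x % N := Nat.add_mod_left N x
    rw [hdiv, hmod]
    rw [pvRunS_eq_run _ _ (by
      intro p hp
      simp only [List.mem_map] at hp
      obtain ⟨j, _, rfl⟩ := hp
      simp only
      have : (0:Int) ≤ ((x / N : Nat) : Int) := by positivity
      split_ifs <;> push_cast <;> omega)]
    apply congrArg (fun l => pvRun l d)
    apply List.map_congr_left
    intro j _
    have : ((x / N + 1 : Nat) : Int) = ((x / N : Nat) : Int) + 1 := by push_cast; ring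
    rw [this]
    ring_nf

-- ===== VERDICT (by name: the statement is the Claim_ definition above) =====
theorem move_source_quota_spec : Claim_equal_move_source_quota := by
  intro counts src dests _
  show move_source_quota counts src dests = move_source_quota_alt counts src dests
  by_cases hnil : dests = []
  · subst hnil
    simp [move_source_quota, move_source_quota_alt, PySem.List.len]
  · have hN : 0 < dests.length := List.length_pos_of_ne_nil hnil
    set d0 := PySem.Dict.ofList counts with hd0
    set moved := d0.getD src 0 with hmoved
    set d1 := d0.insert src 0 with hd1
    by_cases hm : moved ≤ 0
    · simp only [move_source_quota, move_source_quota_alt]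
      rw [if_neg hnil, if_pos (Or.inr hm), PySem.List.pyRange_one_eq_nil hm]
      rfl
    · rw [not_le] at hm
      set N := dests.length with hNdef
      set M := moved.toNat with hMdef
      have hMcast : moved = ((M : Nat) : Int) := (Int.toNat_of_nonneg (by omega)).symm
      simp only [move_source_quota, move_source_quota_alt]
      have hlen : ¬ (PySem.List.len dests = 0) := by
        simp only [PySem.List.len_eq]; omega
      have hm' : ¬ moved ≤ 0 := by omega
      rw [if_neg hnil, if_neg (not_or.2 ⟨hlen, hm'⟩)]
      have hA : ((PySem.List.pyRange 0 moved 1).foldl (fun d i =>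
            d.insert (PySem.List.pyGetD dests (PySem.Int.mod i (PySem.List.len dests)) "")
              (d.getD (PySem.List.pyGetD dests (PySem.Int.mod i (PySem.List.len dests)) "") 0 + 1)) d1)
          = pvRun ((List.range M).map fun i => (dests.getD (i % N) "", (1:Int))) d1 := by
        rw [hMcast, PySem.List.pyRange_zero_natCast]
        simp only [List.foldl_map, pvRun, pvStep, PySem.List.len_eq,
          PySem.Int.mod_natCast, PySem.List.pyGetD_natCast]
        rfl
      have hB : ((PySem.List.enumerate dests 0).foldl (fun d p =>
            if (PySem.Int.floordiv moved (PySem.List.len dests) +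
                (if p.1 < PySem.Int.mod moved (PySem.List.len dests) then 1 else 0)) ≠ 0 then
              d.insert p.2 (d.getD p.2 0 +
                (PySem.Int.floordiv moved (PySem.List.len dests) +
                  (if p.1 < PySem.Int.mod moved (PySem.List.len dests) then 1 else 0)))
            else d) d1)
          = pvRunS ((List.range N).map fun j =>
              (dests.getD j "", ((M / N : Nat) : Int) + if j < M % N then 1 else 0)) d1 := by
        rw [show (0:Int) = (0:Int) from rfl]
        rw [PySem.List.enumerate_eq_map_pyRange dests ""]
        simp only [PySem.List.len_eq, hMcast, PySem.Int.floordiv_natCast, PySem.Int.mod_natCast]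
        rw [PySem.List.pyRange_zero_natCast, List.map_map]
        simp only [List.foldl_map, pvRunS, pvStep, Function.comp,
          PySem.List.pyGetD_natCast, Nat.cast_lt]
        rfl
      rw [hA, hB]
      exact congrArg PySem.Dict.items (pvMain M N (fun j => dests.getD j "") d1 hN)
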